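-- pv_equiv track=rewrite | github.com/JuanmaGuzman/CAPSTONE_backenc | src/publications/helpers/suggestions.py | size_suggestion
-- ===== SOURCE A (Python) =====
-- from typing import Union, Iterable
--
-- _SIZE_IDENTITY_CLASSES = {
--     'xs': {'xs', '36'},
--     's': {'s', '38', '40'},
--     'm': {'m', '42', '44'},
--     'l': {'l', '46', '48'},
--     'xl': {'xl', '50', '52'},
--     'xxl': {'xxl', '54'}
-- }
--
-- def size_identity_class_representative(
--     size: Union[str, None]
-- ) -> Union[str, None]:
--     if size == '':
--         return None
--     for rep, size_class in _SIZE_IDENTITY_CLASSES.items():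
--         if size in size_class:
--             return rep
--
-- def size_suggestion(
--     sizes: Iterable[str]
-- ) -> tuple[set[str], bool]:
--     sizes_set = set(sizes)
--     size_class_rep_set = set()
--     suggestion_set = set()
--
--     for size in sizes_set:
--         size_class_rep = size_identity_class_representative(size)
--         if size_class_rep is not None:
--             size_class_rep_set.add(size_class_rep)
--     for size_class_rep in size_class_rep_set:
--         for size in _SIZE_IDENTITY_CLASSES[size_class_rep]:
--             suggestion_set.add(size)
--
--     return suggestion_set, '' in sizes_set
-- ===== SOURCE B (Python) =====
-- from typing import Union, Iterable
--
-- _SIZE_IDENTITY_CLASSES = {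
--     'xs': {'xs', '36'},
--     's': {'s', '38', '40'},
--     'm': {'m', '42', '44'},
--     'l': {'l', '46', '48'},
--     'xl': {'xl', '50', '52'},
--     'xxl': {'xxl', '54'}
-- }
--
-- # Reverse index: each individual size token -> the full identity class it belongs to.
-- _REVERSE_INDEX = {
--     token: size_class
--     for size_class in _SIZE_IDENTITY_CLASSES.values()
--     for token in size_class
-- }
--
-- def size_suggestion(
--     sizes: Iterable[str]
-- ) -> tuple[set[str], bool]:
--     sizes_set = set(sizes)
--     suggestion_set = set()
--     for size in sizes_set:
--         size_class = _REVERSE_INDEX.get(size)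
--         if size_class is not None:
--             suggestion_set |= size_class
--     return suggestion_set, '' in sizes_set
-- ===== Notes on version B (the rewrite author's own statement) =====
-- stated objective: idiomatic
-- what changed: A precomputed reverse index from each size token to its full identity class replaces A's two sequential passes (collect representatives, then expand each representative); B makes one index-driven pass over the deduplicated sizes, unioning whole classes directly.
import Mathlib
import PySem

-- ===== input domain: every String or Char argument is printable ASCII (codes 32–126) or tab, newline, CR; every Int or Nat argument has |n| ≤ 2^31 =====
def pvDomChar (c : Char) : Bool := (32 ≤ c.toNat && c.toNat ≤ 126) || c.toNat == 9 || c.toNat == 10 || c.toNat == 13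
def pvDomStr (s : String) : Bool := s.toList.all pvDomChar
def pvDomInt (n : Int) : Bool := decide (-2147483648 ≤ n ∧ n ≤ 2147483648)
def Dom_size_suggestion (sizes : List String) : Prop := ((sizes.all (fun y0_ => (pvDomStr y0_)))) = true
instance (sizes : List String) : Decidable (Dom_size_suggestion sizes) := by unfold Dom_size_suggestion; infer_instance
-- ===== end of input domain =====

-- B replaces A's two passes (collect class representatives, then expand them) by one pass over the
-- deduplicated sizes using a precomputed reverse token->class index (objective: idiomatic single pass).


-- ===== PORT A =====
-- _SIZE_IDENTITY_CLASSES as an ordered list of (representative, class) pairs (each set literal's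
-- distinct elements in source order).
def pvClasses : List (String × List String) :=
  [("xs", ["xs", "36"]), ("s", ["s", "38", "40"]), ("m", ["m", "42", "44"]),
   ("l", ["l", "46", "48"]), ("xl", ["xl", "50", "52"]), ("xxl", ["xxl", "54"])]

def pvClassesDict : PySem.Dict String (List String) := PySem.Dict.ofList pvClasses

-- 'for rep, size_class in _SIZE_IDENTITY_CLASSES.items(): if size in size_class: return rep'
def size_identity_class_representative (size : String) : Option String :=
  if size = "" then none
  else (pvClasses.find? (fun p => PySem.Set.contains p.2 size)).map Prod.fst

def size_suggestion (sizes : List String) : List String × Bool :=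
  let sizes_set : PySem.Set String := PySem.Set.ofList sizes
  let size_class_rep_set : PySem.Set String :=
    sizes_set.foldl (fun acc size =>
      match size_identity_class_representative size with
      | some r => PySem.Set.add acc r
      | none => acc) PySem.Set.empty
  let suggestion_set : PySem.Set String :=
    size_class_rep_set.foldl (fun acc r =>
      -- _SIZE_IDENTITY_CLASSES[r]: r is always a key here, so the KeyError branch is unreachable
      (pvClassesDict.getD r []).foldl PySem.Set.add acc) PySem.Set.empty
  (suggestion_set, PySem.Set.contains sizes_set "")

-- ===== PORT B =====
-- _REVERSE_INDEX: each token of each class mapped to the full class.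
def pvReverseIndex : PySem.Dict String (List String) :=
  PySem.Dict.ofList (pvClasses.flatMap (fun p => p.2.map (fun t => (t, p.2))))

def size_suggestion_alt (sizes : List String) : List String × Bool :=
  let sizes_set : PySem.Set String := PySem.Set.ofList sizes
  let suggestion_set : PySem.Set String :=
    sizes_set.foldl (fun acc size =>
      match pvReverseIndex.get? size with
      | some cls => PySem.Set.update acc cls
      | none => acc) PySem.Set.empty
  (suggestion_set, PySem.Set.contains sizes_set "")

-- ===== PRECONDITION & SPEC =====
def Spec_size_suggestion (sizes : List String) (out : List String × Bool) : Prop := out = size_suggestion_alt sizes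
instance (sizes : List String) (out : List String × Bool) : Decidable (Spec_size_suggestion sizes out) := by unfold Spec_size_suggestion; infer_instance

-- ===== CLAIM (what is proved, stated in full; the proofs are below) =====
def Claim_equal_size_suggestion : Prop := ∀ (sizes : List String), Dom_size_suggestion sizes → Spec_size_suggestion sizes (size_suggestion sizes)

-- ===== LEMMAS AND PROOFS =====

-- proof-side names for the two ports' loop bodies
def pvStepA (acc : PySem.Set String) (size : String) : PySem.Set String :=
  match size_identity_class_representative size with
  | some r => PySem.Set.add acc r
  | none => acc

def pvAddClass (acc : PySem.Set String) (r : String) : PySem.Set String :=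
  (pvClassesDict.getD r []).foldl PySem.Set.add acc

def pvStepB (acc : PySem.Set String) (size : String) : PySem.Set String :=
  match pvReverseIndex.get? size with
  | some cls => PySem.Set.update acc cls
  | none => acc

-- the reverse-index lookup is exactly "representative, then class table"
theorem pv_key_lemma (s : String) :
    pvReverseIndex.get? s
      = (size_identity_class_representative s).map (fun r => pvClassesDict.getD r []) := by
  by_cases h : s ∈ ["xs", "36", "s", "38", "40", "m", "42", "44", "l", "46", "48",
                    "xl", "50", "52", "xxl", "54"]
  · fin_cases h <;> rfl
  · simp only [List.mem_cons, List.not_mem_nil, or_false] at h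
    push Not at h
    obtain ⟨h1, h2, h3, h4, h5, h6, h7, h8, h9, h10, h11, h12, h13, h14, h15, h16⟩ := h
    simp only [pvReverseIndex, pvClassesDict, pvClasses, size_identity_class_representative,
          PySem.Dict.ofList, PySem.Dict.get?, PySem.Dict.getD, List.find?, PySem.Set.contains]
    simp [h1, h2, h3, h4, h5, h6, h7, h8, h9, h10, h11, h12, h13, h14, h15, h16]
    intro a b hab
    revert hab
    have hitems : (PySem.Dict.empty.update
        [("xs", ["xs", "36"]), ("36", ["xs", "36"]), ("s", ["s", "38", "40"]),
         ("38", ["s", "38", "40"]), ("40", ["s", "38", "40"]), ("m", ["m", "42", "44"]),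
         ("42", ["m", "42", "44"]), ("44", ["m", "42", "44"]), ("l", ["l", "46", "48"]),
         ("46", ["l", "46", "48"]), ("48", ["l", "46", "48"]), ("xl", ["xl", "50", "52"]),
         ("50", ["xl", "50", "52"]), ("52", ["xl", "50", "52"]), ("xxl", ["xxl", "54"]),
         ("54", ["xxl", "54"])] : PySem.Dict String (List String)).items
        = [("xs", ["xs", "36"]), ("36", ["xs", "36"]), ("s", ["s", "38", "40"]),
         ("38", ["s", "38", "40"]), ("40", ["s", "38", "40"]), ("m", ["m", "42", "44"]),
         ("42", ["m", "42", "44"]), ("44", ["m", "42", "44"]), ("l", ["l", "46", "48"]),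
         ("46", ["l", "46", "48"]), ("48", ["l", "46", "48"]), ("xl", ["xl", "50", "52"]),
         ("50", ["xl", "50", "52"]), ("52", ["xl", "50", "52"]), ("xxl", ["xxl", "54"]),
         ("54", ["xxl", "54"])] := by decide
    rw [hitems]
    intro hab
    fin_cases hab <;> (intro hEq; subst hEq; simp_all)

theorem pv_mem_foldl_add {x : String} {l : List String} {s : PySem.Set String} :
    x ∈ l.foldl PySem.Set.add s ↔ x ∈ s ∨ x ∈ l := by
  induction l generalizing s with
  | nil => simp
  | cons b t ih => simp [List.foldl, ih, PySem.Set.mem_add]; tauto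

theorem pv_foldl_add_of_subset {l : List String} {s : PySem.Set String}
    (h : ∀ x ∈ l, x ∈ s) : l.foldl PySem.Set.add s = s := by
  induction l with
  | nil => rfl
  | cons b t ih =>
    simp only [List.foldl]
    rw [PySem.Set.add_of_mem (h b (by simp))]
    exact ih (fun x hx => h x (by simp [hx]))

theorem pv_foldl_addClass_mono {x : String} {rs : List String} {s0 : PySem.Set String}
    (h : x ∈ s0) : x ∈ rs.foldl pvAddClass s0 := by
  induction rs generalizing s0 with
  | nil => exact h
  | cons b t ih => exact ih (pv_mem_foldl_add.mpr (Or.inl h))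

theorem pv_mem_foldl_addClass_of_mem {rs : List String} {s0 : PySem.Set String}
    {r x : String} (hr : r ∈ rs) (hx : x ∈ pvClassesDict.getD r []) :
    x ∈ rs.foldl pvAddClass s0 := by
  induction rs generalizing s0 with
  | nil => cases hr
  | cons b t ih =>
    rcases List.mem_cons.mp hr with h | h
    · subst h
      simp only [List.foldl]
      exact pv_foldl_addClass_mono
        (show x ∈ pvAddClass s0 r from pv_mem_foldl_add.mpr (Or.inr hx))
    · exact ih h

-- the core correspondence: expanding A's representative set equals B's one-pass fold
theorem pv_expand_eq (l : List String) (acc : PySem.Set String) :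
    (l.foldl pvStepA acc).foldl pvAddClass PySem.Set.empty
      = l.foldl pvStepB (acc.foldl pvAddClass PySem.Set.empty) := by
  induction l generalizing acc with
  | nil => rfl
  | cons s t ih =>
    simp only [List.foldl]
    rw [ih]
    congr 1
    -- step case: expand (stepA acc s) = stepB (expand acc) s
    unfold pvStepA pvStepB
    rw [pv_key_lemma]
    cases hrep : size_identity_class_representative s with
    | none => rfl
    | some r =>
      simp only [Option.map_some]
      unfold PySem.Set.update
      by_cases hmem : r ∈ acc
      · rw [PySem.Set.add_of_mem hmem]
        exact (pv_foldl_add_of_subset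
          (fun x hx => pv_mem_foldl_addClass_of_mem hmem hx)).symm
      · rw [PySem.Set.add_of_not_mem hmem, List.foldl_append]
        rfl

-- ===== VERDICT (by name: the statement is the Claim_ definition above) =====
theorem size_suggestion_spec : Claim_equal_size_suggestion := by
  intro sizes _
  unfold Spec_size_suggestion size_suggestion size_suggestion_alt
  have h := pv_expand_eq (PySem.Set.ofList sizes) PySem.Set.empty
  exact Prod.ext (by exact h) rfl
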